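-- pv_equiv track=rewrite | github.com/sophia-baik/Tree_of_Thoughts-deeplearning | gameof24/ToT_w_backtracking.py | parse_chats_eval_answer
-- ===== SOURCE A (Python) =====
-- def parse_chats_eval_answer(response: str) -> str:
--     """takes long response and returns sure/likely/impossible"""
--     lines = response.split('\n')
--     for i in range(len(lines)-1, -1, -1):
--         line = lines[i].lower()
--         if "sure" in line:
--             return "sure"
--         elif "likely" in line:
--             return "likely"
--         elif "impossible" in line:
--             return "impossible"
-- ===== SOURCE B (Python) =====
-- def parse_chats_eval_answer(response: str) -> str:
--     """takes long response and returns sure/likely/impossible"""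
--     lines = [l.lower() for l in response.split('\n')]
--     best = None
--     best_i = -1
--     for kw in ("sure", "likely", "impossible"):
--         idx = -1
--         j = 0
--         for line in lines:
--             if kw in line:
--                 idx = j
--             j += 1
--         if best_i < idx:
--             best = kw
--             best_i = idx
--     return best
-- ===== Notes on version B (the rewrite author's own statement) =====
-- stated objective: alternative
-- what changed: Instead of scanning lines backwards with an early return and an in-line keyword chain, B computes for each of the three keywords the index of the last line containing it, then selects the keyword with the greatest index (strict comparison breaks ties in priority order sure > likely > impossible).
import Mathlib
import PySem

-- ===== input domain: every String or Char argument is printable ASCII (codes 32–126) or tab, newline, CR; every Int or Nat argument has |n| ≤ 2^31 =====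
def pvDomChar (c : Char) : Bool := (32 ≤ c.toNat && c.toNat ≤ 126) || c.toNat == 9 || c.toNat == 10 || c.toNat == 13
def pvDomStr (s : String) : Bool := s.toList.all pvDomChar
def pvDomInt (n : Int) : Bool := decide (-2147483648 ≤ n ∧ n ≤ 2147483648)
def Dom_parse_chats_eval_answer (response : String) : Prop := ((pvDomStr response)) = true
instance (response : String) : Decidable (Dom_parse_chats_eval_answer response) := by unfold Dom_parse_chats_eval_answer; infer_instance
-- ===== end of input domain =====

-- B replaces A's backward early-return scan by three last-occurrence index searches plus a max-index selection (objective: alternative).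

-- ===== PORT A =====
-- A's backward loop over lines[len-1 .. 0], transliterated as recursion over the reversed line list
def pvLoopA : List String → Option String
  | [] => none
  | l :: rest =>
    let line := PySem.Str.lower l
    if PySem.Str.isIn "sure" line then some "sure"
    else if PySem.Str.isIn "likely" line then some "likely"
    else if PySem.Str.isIn "impossible" line then some "impossible"
    else pvLoopA rest

def parse_chats_eval_answer (response : String) : Option String :=
  pvLoopA ((PySem.Str.split? response "\n").getD []).reverse

-- ===== PORT B =====
-- Source B's inner loop: last index (as a running counter j) of a line containing kw, -1 if none
def pvLastIdxAux (kw : String) (idx j : Int) : List String → Int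
  | [] => idx
  | l :: rest => pvLastIdxAux kw (if PySem.Str.isIn kw l then j else idx) (j + 1) rest

-- Source B's outer loop body: keep the keyword whose last-occurrence index is strictly greater
def pvPick (lines : List String) (best : Option String × Int) (kw : String) : Option String × Int :=
  let idx := pvLastIdxAux kw (-1) 0 lines
  if best.2 < idx then (some kw, idx) else best

def parse_chats_eval_answer_alt (response : String) : Option String :=
  let lines := ((PySem.Str.split? response "\n").getD []).map PySem.Str.lower
  (["sure", "likely", "impossible"].foldl (pvPick lines) (none, -1)).1

-- ===== PRECONDITION & SPEC =====
def Spec_parse_chats_eval_answer (response : String) (out : Option String) : Prop := out = parse_chats_eval_answer_alt response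
instance (response : String) (out : Option String) : Decidable (Spec_parse_chats_eval_answer response out) := by unfold Spec_parse_chats_eval_answer; infer_instance

-- ===== CLAIM (what is proved, stated in full; the proofs are below) =====
def Claim_equal_parse_chats_eval_answer : Prop := ∀ (response : String), Dom_parse_chats_eval_answer response → Spec_parse_chats_eval_answer response (parse_chats_eval_answer response)

-- ===== LEMMAS AND PROOFS =====

lemma pvLastIdxAux_append (kw : String) (xs : List String) (x : String) :
    ∀ idx j, pvLastIdxAux kw idx j (xs ++ [x]) =
      if PySem.Str.isIn kw x then j + (xs.length : Int) else pvLastIdxAux kw idx j xs := by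
  induction xs with
  | nil => intro idx j; simp [pvLastIdxAux]
  | cons l rest ih =>
    intro idx j
    simp only [List.cons_append, pvLastIdxAux, ih, List.length_cons]
    split_ifs <;> push_cast <;> ring_nf

lemma pvLastIdxAux_lt (kw : String) (xs : List String) :
    ∀ idx j, idx < j → pvLastIdxAux kw idx j xs < j + (xs.length : Int) := by
  induction xs with
  | nil => intro idx j h; simpa [pvLastIdxAux] using by omega
  | cons l rest ih =>
    intro idx j h
    simp only [pvLastIdxAux, List.length_cons]
    have := ih (if PySem.Str.isIn kw l then j else idx) (j + 1) (by split_ifs <;> omega)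
    push_cast
    push_cast at this
    omega

lemma pvKey (ls : List String) :
    pvLoopA ls.reverse =
      (["sure", "likely", "impossible"].foldl (pvPick (ls.map PySem.Str.lower)) (none, -1)).1 := by
  induction ls using List.reverseRecOn with
  | nil => simp [pvLoopA, pvPick, pvLastIdxAux]
  | append_singleton xs x ih =>
    have hlen : ((xs.map PySem.Str.lower).length : Int) = (xs.length : Int) := by simp
    have h1 := pvLastIdxAux_lt "sure" (xs.map PySem.Str.lower) (-1) 0 (by omega)
    have h2 := pvLastIdxAux_lt "likely" (xs.map PySem.Str.lower) (-1) 0 (by omega)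
    have h3 := pvLastIdxAux_lt "impossible" (xs.map PySem.Str.lower) (-1) 0 (by omega)
    rw [hlen] at h1 h2 h3
    simp only [List.reverse_append, List.reverse_singleton, List.singleton_append, pvLoopA,
      List.foldl_cons, List.foldl_nil] at ih ⊢
    simp only [List.map_append, List.map_cons, List.map_nil, pvPick,
      pvLastIdxAux_append, hlen, zero_add]
    by_cases hs : PySem.Str.isIn "sure" (PySem.Str.lower x) <;>
      by_cases hl : PySem.Str.isIn "likely" (PySem.Str.lower x) <;>
      by_cases hi : PySem.Str.isIn "impossible" (PySem.Str.lower x) <;>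
      simp only [hs, hl, hi, if_true] <;>
      [skip; skip; skip; skip; skip; skip; skip; exact ih] <;>
      split_ifs <;> simp_all <;> omega

-- ===== VERDICT (by name: the statement is the Claim_ definition above) =====
theorem parse_chats_eval_answer_spec : Claim_equal_parse_chats_eval_answer := by
  intro response _
  unfold Spec_parse_chats_eval_answer parse_chats_eval_answer parse_chats_eval_answer_alt
  exact pvKey _
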